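-- pv_equiv track=rewrite | github.com/KrShaswat/-unsolved | DSA/Arrays/Bit-Manipulation/finding-nth-magic-number/python/findingNthMagicNumber.py | findingNthMagicNumber
-- ===== SOURCE A (Python) =====
-- def findingNthMagicNumber(A):
--         ans = 0
--         power = 1
--         while A > 0:
--             if A & 1:
--                 ans += (5**power)
--             A = A >> 1
--             power += 1
--
--         return ans
-- ===== SOURCE B (Python) =====
-- def findingNthMagicNumber(A):
--     if A <= 0:
--         return 0
--     val = 0
--     for c in bin(A)[2:]:
--         val = val * 5 + int(c)
--     return val * 5
-- ===== Notes on version B (the rewrite author's own statement) =====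
-- stated objective: alternative
-- what changed: Replaces the LSB-first while-loop that sums explicit 5**power terms with an MSB-first Horner evaluation over the binary digit string bin(A)[2:], finishing with one multiplication by 5.
import Mathlib
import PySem

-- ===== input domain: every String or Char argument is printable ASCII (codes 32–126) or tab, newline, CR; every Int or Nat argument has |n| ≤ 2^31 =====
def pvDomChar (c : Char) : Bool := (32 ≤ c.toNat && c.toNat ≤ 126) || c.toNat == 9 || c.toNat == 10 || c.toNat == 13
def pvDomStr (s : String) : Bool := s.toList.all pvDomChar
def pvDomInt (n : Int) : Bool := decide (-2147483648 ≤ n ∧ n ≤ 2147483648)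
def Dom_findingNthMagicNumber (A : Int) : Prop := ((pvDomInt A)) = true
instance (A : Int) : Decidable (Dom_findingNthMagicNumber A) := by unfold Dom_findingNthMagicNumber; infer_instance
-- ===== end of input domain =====

-- B re-expresses A's LSB-first sum of 5**power terms as an MSB-first Horner
-- evaluation of the binary digit string; same cost, different decomposition.


-- termination helper for the while loop of A (cited by decreasing_by)
theorem pvShiftNat (n : Nat) : ((n:Int) >>> (1:Int)) = ((n / 2 : Nat) : Int) := by
  simp; rfl

theorem pvShiftToNatLt (A : Int) (h : 0 < A) : (A >>> (1:Int)).toNat < A.toNat := by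
  have hA : ((A.toNat : Int)) = A := Int.toNat_of_nonneg (le_of_lt h)
  rw [← hA, pvShiftNat]
  simp
  omega

-- ===== PORT A =====
-- while A > 0: if A & 1: ans += 5**power; A >>= 1; power += 1
def pvLoopA (A ans power : Int) : Int :=
  if h : A > 0 then
    pvLoopA (A >>> (1:Int))
      (if Int.land A 1 ≠ 0 then ans + 5 ^ power.toNat else ans)
      (power + 1)
  else ans
termination_by A.toNat
decreasing_by exact pvShiftToNatLt A h

def findingNthMagicNumber (A : Int) : Int := pvLoopA A 0 1

-- ===== PORT B =====
-- hand port of Python's bin(n)[2:] for n > 0: MSB-first binary digit characters (exact there)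
def pvBinDigits (n : Nat) : List Char :=
  if n = 0 then [] else pvBinDigits (n / 2) ++ [if n % 2 = 1 then '1' else '0']

def findingNthMagicNumber_alt (A : Int) : Int :=
  if A ≤ 0 then 0
  else
    -- int(c) on a '0'/'1' digit character is c.toNat - 48 (exact)
    let val := (pvBinDigits A.toNat).foldl (fun v c => v * 5 + Int.ofNat (c.toNat - 48)) 0
    val * 5

-- ===== PRECONDITION & SPEC =====
def Spec_findingNthMagicNumber (A : Int) (out : Int) : Prop := out = findingNthMagicNumber_alt A
instance (A : Int) (out : Int) : Decidable (Spec_findingNthMagicNumber A out) := by unfold Spec_findingNthMagicNumber; infer_instance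

-- ===== CLAIM =====
def Claim_equal_findingNthMagicNumber : Prop := ∀ (A : Int), Dom_findingNthMagicNumber A → Spec_findingNthMagicNumber A (findingNthMagicNumber A)

-- ===== LEMMAS AND PROOFS =====

-- base-5 value of the binary digits of n (little-endian recursion)
def pvF (n : Nat) : Int := if n = 0 then 0 else 5 * pvF (n / 2) + (n % 2 : Nat)

theorem pvFoldB (n : Nat) :
    (pvBinDigits n).foldl (fun v c => v * 5 + Int.ofNat (c.toNat - 48)) 0 = pvF n := by
  induction n using Nat.strong_induction_on with
  | _ n ih =>
    unfold pvBinDigits pvF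
    by_cases h : n = 0
    · simp [h]
    · simp only [h, if_false, List.foldl_append, ih (n / 2) (by omega)]
      rcases Nat.mod_two_eq_zero_or_one n with h2 | h2 <;> simp [h2] <;> ring

theorem pvLoopA_eq (n : Nat) : ∀ (ans power : Int), 0 ≤ power →
    pvLoopA (n : Int) ans power = ans + 5 ^ power.toNat * pvF n := by
  induction n using Nat.strong_induction_on with
  | _ n ih =>
    intro ans power hp
    by_cases h : n = 0
    · unfold pvLoopA pvF; simp [h]
    · have hpos : ((n : Int)) > 0 := by exact_mod_cast Nat.pos_of_ne_zero h
      have hshift : ((n : Int) >>> (1:Int)) = ((n / 2 : Nat) : Int) := by simp; rfl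
      have hland : Int.land (n : Int) 1 = ((n % 2 : Nat) : Int) := by
        simp [Int.land, Nat.and_one_is_mod]
      have hrec := ih (n / 2) (by omega)
      have hpt : (power + 1).toNat = power.toNat + 1 := by omega
      unfold pvLoopA
      rw [dif_pos hpos, hshift, hland, hrec _ (power + 1) (by omega)]
      have hF : pvF n = 5 * pvF (n / 2) + (n % 2 : Nat) := by
        rw [pvF]; simp [h]
      rw [hF, hpt]
      rcases Nat.mod_two_eq_zero_or_one n with h2 | h2 <;>
        rw [h2] <;> simp [pow_succ] <;> ring

-- ===== VERDICT =====
theorem findingNthMagicNumber_spec : Claim_equal_findingNthMagicNumber := by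
  unfold Claim_equal_findingNthMagicNumber
  intro A _
  unfold Spec_findingNthMagicNumber findingNthMagicNumber findingNthMagicNumber_alt
  by_cases h : A ≤ 0
  · unfold pvLoopA
    rw [dif_neg (by omega : ¬ A > 0), if_pos h]
  · rw [if_neg h]
    obtain ⟨n, rfl⟩ : ∃ n : Nat, A = (n : Int) :=
      ⟨A.toNat, (Int.toNat_of_nonneg (by omega)).symm⟩
    rw [pvLoopA_eq n 0 1 (by omega)]
    simp only [Int.toNat_natCast]
    rw [pvFoldB]
    norm_num [mul_comm]
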